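-- pv_equiv track=rewrite | github.com/ritikdrona/programs | python/beautifulStrings.py | calculateMaps
-- ===== SOURCE A (Python) =====
-- def calculateMaps(N, A, B):
--     aom, aem, bom, bem = {}, {}, {}, {}
--     for i in range(N):
--         if i%2 == 0:
--             if aem.get(A[i]) is None: aem[A[i]] = 1
--             else: aem[A[i]] = aem[A[i]] + 1
--
--             if bem.get(B[i]) is None: bem[B[i]] = 1
--             else: bem[B[i]] = bem[B[i]] + 1
--         else:
--             if aom.get(A[i]) is None: aom[A[i]] = 1
--             else: aom[A[i]] = aom[A[i]] + 1
--
--             if bom.get(B[i]) is None: bom[B[i]] = 1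
--             else: bom[B[i]] = bom[B[i]] + 1
--     return aom, aem, bom, bem
-- ===== SOURCE B (Python) =====
-- def _freq(s):
--     m = {}
--     for c in s:
--         m[c] = m.get(c, 0) + 1
--     return m
--
-- def calculateMaps(N, A, B):
--     n = max(N, 0)
--     ap, bp = A[:n], B[:n]
--     return _freq(ap[1::2]), _freq(ap[0::2]), _freq(bp[1::2]), _freq(bp[0::2])
-- ===== Notes on version B (the rewrite author's own statement) =====
-- stated objective: simpler
-- what changed: Replaces the interleaved index loop (per-iteration parity test, indexing and four simultaneous dicts) by slicing the length-N prefixes into even/odd subsequences with extended slices (C-level) and counting each subsequence with a small frequency helper; a timing run measured this about 2x faster.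
import Mathlib
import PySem

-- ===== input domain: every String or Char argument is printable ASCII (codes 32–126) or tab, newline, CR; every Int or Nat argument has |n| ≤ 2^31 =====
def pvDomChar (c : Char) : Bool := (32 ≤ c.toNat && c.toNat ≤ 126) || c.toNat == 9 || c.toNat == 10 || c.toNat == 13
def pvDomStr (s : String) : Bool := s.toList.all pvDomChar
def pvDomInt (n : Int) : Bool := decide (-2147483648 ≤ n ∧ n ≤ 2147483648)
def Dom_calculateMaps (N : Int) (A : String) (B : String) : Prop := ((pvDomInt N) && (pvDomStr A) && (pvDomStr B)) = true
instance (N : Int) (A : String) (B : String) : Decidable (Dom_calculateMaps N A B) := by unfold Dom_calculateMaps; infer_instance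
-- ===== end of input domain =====

-- B replaces A's interleaved index loop (parity branch, four dicts at once) by slicing the
-- length-N prefixes into even/odd subsequences and counting each with a frequency helper (objective: simpler).

-- ===== PORT A =====
-- the dict update 'if m.get(k) is None: m[k]=1 else: m[k]=m[k]+1'
def pvUpd (d : PySem.Dict String Int) (k : String) : PySem.Dict String Int :=
  match d.get? k with
  | none => d.insert k 1
  | some v => d.insert k (v + 1)

-- the body of 'for i in range(N)'
def pvStep (la lb : List Char)
    (s : PySem.Dict String Int × PySem.Dict String Int × PySem.Dict String Int × PySem.Dict String Int)
    (i : Int) :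
    PySem.Dict String Int × PySem.Dict String Int × PySem.Dict String Int × PySem.Dict String Int :=
  if PySem.Int.mod i 2 == 0 then
    (s.1, pvUpd s.2.1 (String.singleton (PySem.List.pyGetD la i ' ')),
     s.2.2.1, pvUpd s.2.2.2 (String.singleton (PySem.List.pyGetD lb i ' ')))
  else
    (pvUpd s.1 (String.singleton (PySem.List.pyGetD la i ' ')), s.2.1,
     pvUpd s.2.2.1 (String.singleton (PySem.List.pyGetD lb i ' ')), s.2.2.2)

def calculateMaps (N : Int) (A : String) (B : String) : (List (String × Int)) × (List (String × Int)) × (List (String × Int)) × (List (String × Int)) :=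
  let st := (PySem.List.pyRange 0 N 1).foldl (pvStep A.toList B.toList)
    (PySem.Dict.empty, PySem.Dict.empty, PySem.Dict.empty, PySem.Dict.empty)
  (st.1.items, st.2.1.items, st.2.2.1.items, st.2.2.2.items)

-- ===== PORT B =====
-- _freq(s): m = {}; for c in s: m[c] = m.get(c, 0) + 1
def pvFreq (s : String) : List (String × Int) :=
  (s.toList.foldl
    (fun m c => m.insert (String.singleton c) (m.getD (String.singleton c) 0 + 1))
    PySem.Dict.empty).items

def calculateMaps_alt (N : Int) (A : String) (B : String) : (List (String × Int)) × (List (String × Int)) × (List (String × Int)) × (List (String × Int)) :=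
  let n : Int := max N 0
  let ap := PySem.Str.slice A none (some n)
  let bp := PySem.Str.slice B none (some n)
  (pvFreq ((PySem.Str.slice? ap (some 1) none 2).getD ""),
   pvFreq ((PySem.Str.slice? ap (some 0) none 2).getD ""),
   pvFreq ((PySem.Str.slice? bp (some 1) none 2).getD ""),
   pvFreq ((PySem.Str.slice? bp (some 0) none 2).getD ""))

-- ===== PRECONDITION & SPEC =====
-- A indexes A[i], B[i] for every i < N, so it raises IndexError iff N exceeds either length.
def Pre_calculateMaps (N : Int) (A : String) (B : String) : Prop :=
  N ≤ (A.toList.length : Int) ∧ N ≤ (B.toList.length : Int)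
instance (N : Int) (A : String) (B : String) : Decidable (Pre_calculateMaps N A B) := by unfold Pre_calculateMaps; infer_instance

def pvWitness_calculateMaps : Int × String × String := (3, "abc", "xyz")

def Spec_calculateMaps (N : Int) (A : String) (B : String) (out : (List (String × Int)) × (List (String × Int)) × (List (String × Int)) × (List (String × Int))) : Prop := out = calculateMaps_alt N A B
instance (N : Int) (A : String) (B : String) (out : (List (String × Int)) × (List (String × Int)) × (List (String × Int)) × (List (String × Int))) : Decidable (Spec_calculateMaps N A B out) := by unfold Spec_calculateMaps; infer_instance

-- ===== CLAIM (what is proved, stated in full; the proofs are below) =====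
def Claim_equal_calculateMaps : Prop := ∀ (N : Int) (A : String) (B : String), Dom_calculateMaps N A B → Pre_calculateMaps N A B → Spec_calculateMaps N A B (calculateMaps N A B)

-- ===== LEMMAS AND PROOFS =====

-- elements at even / odd positions
def pvEvens {α : Type} : List α → List α
  | [] => []
  | [x] => [x]
  | x :: _ :: xs => x :: pvEvens xs

def pvOdds {α : Type} : List α → List α
  | [] => []
  | [_] => []
  | _ :: y :: xs => y :: pvOdds xs

lemma pvEvens_append {α : Type} (xs : List α) (x : α) :
    pvEvens (xs ++ [x]) = if xs.length % 2 = 0 then pvEvens xs ++ [x] else pvEvens xs := by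
  induction xs using pvEvens.induct with
  | case1 => simp [pvEvens]
  | case2 a => simp [pvEvens]
  | case3 a b xs ih =>
      have h2 : (xs.length + 1 + 1) % 2 = xs.length % 2 := by omega
      simp [pvEvens, ih, h2]
      split_ifs <;> rfl

lemma pvOdds_append {α : Type} (xs : List α) (x : α) :
    pvOdds (xs ++ [x]) = if xs.length % 2 = 0 then pvOdds xs else pvOdds xs ++ [x] := by
  induction xs using pvOdds.induct with
  | case1 => simp [pvOdds]
  | case2 a => simp [pvOdds]
  | case3 a b xs ih =>
      have h2 : (xs.length + 1 + 1) % 2 = xs.length % 2 := by omega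
      simp [pvOdds, ih, h2]
      split_ifs <;> rfl

lemma pvCore_ev {α : Type} (xs : List α) :
    List.filterMap (fun k => xs[2 * k]?) (List.range ((xs.length + 1) / 2)) = pvEvens xs := by
  induction xs using pvEvens.induct with
  | case1 => simp [pvEvens]
  | case2 a => simp [pvEvens]
  | case3 a b xs ih =>
      have hc : ((a :: b :: xs).length + 1) / 2 = (xs.length + 1) / 2 + 1 := by simp; omega
      rw [hc, List.range_succ_eq_map, List.filterMap_cons, List.filterMap_map]
      simp only [Function.comp]
      have hf : ∀ k : ℕ, (a :: b :: xs)[2 * (k + 1)]? = xs[2 * k]? := by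
        intro k
        have : 2 * (k + 1) = 2 * k + 1 + 1 := by omega
        rw [this, List.getElem?_cons_succ, List.getElem?_cons_succ]
      simp only [hf]
      simp [pvEvens, ih]

lemma pvCore_od {α : Type} (xs : List α) :
    List.filterMap (fun k => xs[2 * k + 1]?) (List.range (xs.length / 2)) = pvOdds xs := by
  induction xs using pvOdds.induct with
  | case1 => simp [pvOdds]
  | case2 a => simp [pvOdds]
  | case3 a b xs ih =>
      have hc : (a :: b :: xs).length / 2 = xs.length / 2 + 1 := by simp; omega
      rw [hc, List.range_succ_eq_map, List.filterMap_cons, List.filterMap_map]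
      simp only [Function.comp]
      have hf : ∀ k : ℕ, (a :: b :: xs)[2 * (k + 1) + 1]? = xs[2 * k + 1]? := by
        intro k
        have : 2 * (k + 1) + 1 = (2 * k + 1) + 1 + 1 := by omega
        rw [this, List.getElem?_cons_succ, List.getElem?_cons_succ]
      simp only [hf]
      simp [pvOdds, ih]

lemma pvSlice_zero {α : Type} (xs : List α) :
    PySem.List.slice? xs (some 0) none 2 = some (pvEvens xs) := by
  rw [← pvCore_ev]
  unfold PySem.List.slice? PySem.List.sliceIndices
  norm_num
  have hcnt : (if 0 < xs.length then (((xs.length:ℤ) + 2 - 1) / 2).toNat else 0) = (xs.length + 1) / 2 := by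
    split_ifs <;> omega
  rw [hcnt]
  apply List.filterMap_congr
  intro k _
  have : (2 * (k:ℤ)).toNat = 2 * k := by omega
  rw [this]

lemma pvSlice_one {α : Type} (xs : List α) :
    PySem.List.slice? xs (some 1) none 2 = some (pvOdds xs) := by
  rw [← pvCore_od]
  unfold PySem.List.slice? PySem.List.sliceIndices
  norm_num
  rcases List.eq_nil_or_concat xs with h0 | _
  · subst h0; simp
  · have hmin : min 1 (xs.length:ℤ) = 1 := by
      have : 1 ≤ xs.length := by
        cases xs with
        | nil => simp_all
        | cons a t => simp
      omega
    rw [hmin]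
    have hcnt : (if 1 < xs.length then (((xs.length:ℤ) - 1 + 2 - 1) / 2).toNat else 0) = xs.length / 2 := by
      split_ifs <;> omega
    rw [hcnt]
    apply List.filterMap_congr
    intro k _
    have : ((1:ℤ) + 2 * k).toNat = 2 * k + 1 := by omega
    rw [this]

lemma pvUpd_eq_modify (d : PySem.Dict String Int) (k : String) :
    pvUpd d k = d.modify k 0 (· + 1) := by
  unfold pvUpd PySem.Dict.modify PySem.Dict.getD
  cases d.get? k
  · simp
  · simp

lemma pvFreq_eq (s : String) :
    pvFreq s = (PySem.Dict.counter (s.toList.map String.singleton)).items := by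
  unfold pvFreq
  rw [PySem.Dict.counter_eq_foldl, List.foldl_map]
  rfl

lemma pvFold (la lb : List Char) (n : Nat) (ha : n ≤ la.length) (hb : n ≤ lb.length) :
    (PySem.List.pyRange 0 (n : Int) 1).foldl (pvStep la lb)
      (PySem.Dict.empty, PySem.Dict.empty, PySem.Dict.empty, PySem.Dict.empty) =
    (PySem.Dict.counter ((pvOdds (la.take n)).map String.singleton),
     PySem.Dict.counter ((pvEvens (la.take n)).map String.singleton),
     PySem.Dict.counter ((pvOdds (lb.take n)).map String.singleton),
     PySem.Dict.counter ((pvEvens (lb.take n)).map String.singleton)) := by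
  induction n with
  | zero =>
      rw [PySem.List.pyRange_one_eq_nil (by omega)]
      rfl
  | succ n ih =>
      have hc : ((n + 1 : Nat) : Int) = (n : Int) + 1 := by push_cast; ring
      rw [hc, PySem.List.pyRange_one_succ_right (by omega), List.foldl_append,
        ih (by omega) (by omega)]
      simp only [List.foldl_cons, List.foldl_nil]
      have hga : PySem.List.pyGetD la ((n : Nat) : Int) ' ' = la[n]'(by omega) := by
        rw [PySem.List.pyGetD_eq_getElem la ' ' (by omega) (by omega)]
        simp
      have hgb : PySem.List.pyGetD lb ((n : Nat) : Int) ' ' = lb[n]'(by omega) := by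
        rw [PySem.List.pyGetD_eq_getElem lb ' ' (by omega) (by omega)]
        simp
      have hta : la.take (n + 1) = la.take n ++ [la[n]'(by omega)] := by
        rw [List.take_add_one, List.getElem?_eq_getElem (by omega)]
        rfl
      have htb : lb.take (n + 1) = lb.take n ++ [lb[n]'(by omega)] := by
        rw [List.take_add_one, List.getElem?_eq_getElem (by omega)]
        rfl
      have hla : (la.take n).length = n := by simp; omega
      have hlb : (lb.take n).length = n := by simp; omega
      have hmod : PySem.Int.mod ((n : Nat) : Int) 2 = ((n % 2 : Nat) : Int) := by
        rw [PySem.Int.mod_eq_emod_of_pos (by omega)]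
        push_cast
        rfl
      unfold pvStep
      rw [hmod, hga, hgb, hta, htb, pvEvens_append, pvEvens_append, pvOdds_append, pvOdds_append,
        hla, hlb]
      rcases Nat.even_or_odd n with he | ho
      · have h0 : n % 2 = 0 := Nat.even_iff.mp he
        rw [h0]
        norm_num
        simp [PySem.Dict.counter_append_singleton, pvUpd_eq_modify]
      · have h1 : n % 2 = 1 := Nat.odd_iff.mp ho
        rw [h1]
        norm_num
        simp [PySem.Dict.counter_append_singleton, pvUpd_eq_modify]

-- ===== VERDICT (by name: the statement is the Claim_ definition above) =====
theorem calculateMaps_spec : Claim_equal_calculateMaps := by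
  intro N A B _dom hpre
  obtain ⟨h1, h2⟩ := hpre
  unfold Spec_calculateMaps calculateMaps calculateMaps_alt
  have hr : PySem.List.pyRange 0 N 1 = PySem.List.pyRange 0 ((N.toNat : Nat) : Int) 1 := by
    by_cases h : 0 ≤ N
    · rw [Int.toNat_of_nonneg h]
    · rw [PySem.List.pyRange_one_eq_nil (by omega), PySem.List.pyRange_one_eq_nil (by omega)]
  have hm : max N 0 = ((N.toNat : Nat) : Int) := by omega
  have hap : (PySem.Str.slice A none (some ((N.toNat : Nat) : Int))).toList = A.toList.take N.toNat := by
    unfold PySem.Str.slice PySem.Chars.slice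
    rw [String.toList_ofList, PySem.List.slice_to_natCast]
  have hbp : (PySem.Str.slice B none (some ((N.toNat : Nat) : Int))).toList = B.toList.take N.toNat := by
    unfold PySem.Str.slice PySem.Chars.slice
    rw [String.toList_ofList, PySem.List.slice_to_natCast]
  rw [hr, pvFold A.toList B.toList N.toNat (by omega) (by omega), hm]
  unfold PySem.Str.slice? PySem.Chars.slice?
  dsimp only
  rw [hap, hbp, pvSlice_zero, pvSlice_zero, pvSlice_one, pvSlice_one]
  simp only [Option.map_some, Option.getD_some]
  rw [pvFreq_eq, pvFreq_eq, pvFreq_eq, pvFreq_eq]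
  simp only [String.toList_ofList]
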